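-- pv_equiv track=rewrite | github.com/umaparvat/karumachi_python_programs | searching/get_thrice_repeated_element.py | get_repeated_twice_element_in_thrice
-- ===== SOURCE A (Python) =====
-- def get_repeated_twice_element_in_thrice(arr):
--     """
--     time complexity: O(n)
--     space complexity: O(1)
--     :param arr:
--     :return:
--     """
--     n = len(arr)
--     m = max(arr)
--     xr = 0
--     for i in range(1, m+1):
--         xr^=i
--     for i in range(n):
--         xr^=arr[i]
--     return xr
-- ===== SOURCE B (Python) =====
-- def get_repeated_twice_element_in_thrice(arr):
--     # closed-form XOR of 1..m (by m % 4) instead of a loop over the range, then XOR the array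
--     m = max(arr)
--     prefix = (m, 1, m + 1, 0)[m % 4] if m >= 1 else 0
--     for x in arr:
--         prefix ^= x
--     return prefix
-- ===== Notes on version B (the rewrite author's own statement) =====
-- stated objective: faster
-- what changed: Replaces the O(m)-iteration loop XOR-ing 1..max(arr) with the closed-form XOR of 1..m selected by m % 4, keeping a single pass over the array.
-- outside the precondition, e.g. on get_repeated_twice_element_in_thrice([]): A raises ValueError, B raises ValueError
import Mathlib
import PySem

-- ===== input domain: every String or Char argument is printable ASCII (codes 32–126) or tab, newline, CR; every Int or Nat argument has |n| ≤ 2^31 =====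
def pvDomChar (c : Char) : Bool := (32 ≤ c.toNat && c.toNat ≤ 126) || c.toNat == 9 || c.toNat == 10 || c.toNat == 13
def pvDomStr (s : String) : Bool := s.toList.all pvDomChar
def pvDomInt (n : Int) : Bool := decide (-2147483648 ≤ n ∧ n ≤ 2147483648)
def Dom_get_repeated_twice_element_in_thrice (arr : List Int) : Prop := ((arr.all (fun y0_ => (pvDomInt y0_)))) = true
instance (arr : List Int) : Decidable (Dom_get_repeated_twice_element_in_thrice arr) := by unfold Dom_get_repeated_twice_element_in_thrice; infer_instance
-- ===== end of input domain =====

-- B replaces A's loop XOR-ing 1..max(arr) with the closed form selected by m % 4 (faster: O(n) vs O(n+m)).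

-- ===== PORT A =====
def get_repeated_twice_element_in_thrice (arr : List Int) : Int :=
  let n : Int := (arr.length : Int)
  match PySem.List.max? arr (fun x => x) with
  | none => 0   -- Python raises ValueError on max([]); excluded by Pre_
  | some m =>
    let xr : Int := (PySem.List.pyRange 1 (m + 1) 1).foldl PySem.Int.bxor 0
    (PySem.List.pyRange 0 n 1).foldl (fun acc i => PySem.Int.bxor acc (PySem.List.pyGetD arr i 0)) xr

-- ===== PORT B =====
def get_repeated_twice_element_in_thrice_alt (arr : List Int) : Int :=
  match PySem.List.max? arr (fun x => x) with
  | none => 0   -- Python raises ValueError on max([]); excluded by Pre_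
  | some m =>
    let prefixXor : Int :=
      if 1 ≤ m then
        if PySem.Int.mod m 4 = 0 then m
        else if PySem.Int.mod m 4 = 1 then 1
        else if PySem.Int.mod m 4 = 2 then m + 1
        else 0
      else 0
    arr.foldl PySem.Int.bxor prefixXor

-- ===== PRECONDITION & SPEC =====
-- A raises ValueError on max([]) for the empty list; Pre_ excludes exactly that.
def Pre_get_repeated_twice_element_in_thrice (arr : List Int) : Prop := arr ≠ []
instance (arr : List Int) : Decidable (Pre_get_repeated_twice_element_in_thrice arr) := by unfold Pre_get_repeated_twice_element_in_thrice; infer_instance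
def pvWitness_get_repeated_twice_element_in_thrice : List Int := [1, 2, 3, 2]

def Spec_get_repeated_twice_element_in_thrice (arr : List Int) (out : Int) : Prop := out = get_repeated_twice_element_in_thrice_alt arr
instance (arr : List Int) (out : Int) : Decidable (Spec_get_repeated_twice_element_in_thrice arr out) := by unfold Spec_get_repeated_twice_element_in_thrice; infer_instance

-- ===== CLAIM (what is proved, stated in full; the proofs are below) =====
def Claim_equal_get_repeated_twice_element_in_thrice : Prop := ∀ (arr : List Int), Dom_get_repeated_twice_element_in_thrice arr → Pre_get_repeated_twice_element_in_thrice arr → Spec_get_repeated_twice_element_in_thrice arr (get_repeated_twice_element_in_thrice arr)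

-- ===== LEMMAS AND PROOFS =====

-- closed form for XOR of 1..n over Nat, cast to Int
theorem pv_xor_range (n : Nat) :
    (PySem.List.pyRange 1 ((n : Int) + 1) 1).foldl PySem.Int.bxor 0 =
      (if n % 4 = 0 then (n : Int)
       else if n % 4 = 1 then 1
       else if n % 4 = 2 then (n : Int) + 1
       else 0) := by
  induction n with
  | zero => simp [PySem.List.pyRange_one_eq_nil]
  | succ k ih =>
    have hsplit : PySem.List.pyRange 1 ((k : Int) + 1 + 1) 1
        = PySem.List.pyRange 1 ((k : Int) + 1) 1 ++ [(k : Int) + 1] := by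
      exact PySem.List.pyRange_one_succ_right (by omega)
    have hc : ((k : Int) + 1 + 1) = (((k + 1 : Nat) : Int) + 1) := by push_cast; ring
    rw [← hc, hsplit, List.foldl_append, ih]
    have hcast : ((k : Int) + 1) = ((k + 1 : Nat) : Int) := by push_cast; ring
    have h4 : k % 4 = 0 ∨ k % 4 = 1 ∨ k % 4 = 2 ∨ k % 4 = 3 := by omega
    rcases h4 with h | h | h | h
    · have hk1 : (k + 1) % 4 = 1 := by omega
      have heven : Even k := by
        rcases Nat.even_or_odd k with he | ho
        · exact he
        · exfalso; rcases ho with ⟨j, hj⟩; omega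
      have hx : k ^^^ (k + 1) = 1 := by
        rw [← Nat.xor_one_of_even heven, Nat.xor_xor_cancel_left]
      rw [if_pos h, if_neg (by omega : ¬ (k+1) % 4 = 0), if_pos hk1,
        List.foldl_cons, List.foldl_nil, hcast, PySem.Int.bxor_natCast, hx]
      norm_num
    · have hk1 : (k + 1) % 4 = 2 := by omega
      have heven : Even (k + 1) := by
        rcases Nat.even_or_odd (k + 1) with he | ho
        · exact he
        · exfalso; rcases ho with ⟨j, hj⟩; omega
      have hx : 1 ^^^ (k + 1) = (k + 1) + 1 := by
        rw [Nat.xor_comm, Nat.xor_one_of_even heven]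
      rw [if_neg (by omega : ¬ k % 4 = 0), if_pos h,
        if_neg (by omega : ¬ (k+1) % 4 = 0), if_neg (by omega : ¬ (k+1) % 4 = 1), if_pos hk1,
        List.foldl_cons, List.foldl_nil, hcast,
        (by norm_num : (1 : Int) = ((1 : Nat) : Int)), PySem.Int.bxor_natCast, hx]
      push_cast; ring
    · have hk1 : (k + 1) % 4 = 3 := by omega
      rw [if_neg (by omega : ¬ k % 4 = 0), if_neg (by omega : ¬ k % 4 = 1), if_pos h,
        if_neg (by omega : ¬ (k+1) % 4 = 0), if_neg (by omega : ¬ (k+1) % 4 = 1),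
        if_neg (by omega : ¬ (k+1) % 4 = 2),
        List.foldl_cons, List.foldl_nil, hcast, PySem.Int.bxor_self]
    · have hk1 : (k + 1) % 4 = 0 := by omega
      rw [if_neg (by omega : ¬ k % 4 = 0), if_neg (by omega : ¬ k % 4 = 1),
        if_neg (by omega : ¬ k % 4 = 2), if_pos hk1,
        List.foldl_cons, List.foldl_nil, hcast,
        PySem.Int.bxor_comm, PySem.Int.bxor_zero]

-- ===== VERDICT (by name: the statement is the Claim_ definition above) =====
theorem get_repeated_twice_element_in_thrice_spec : Claim_equal_get_repeated_twice_element_in_thrice := by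
  intro arr _ hpre
  unfold Spec_get_repeated_twice_element_in_thrice
  unfold get_repeated_twice_element_in_thrice get_repeated_twice_element_in_thrice_alt
  cases hmax : PySem.List.max? arr (fun x => x) with
  | none => rfl
  | some m =>
    simp only
    rw [PySem.List.foldl_pyRange_zero_pyGetD' arr 0 PySem.Int.bxor]
    congr 1
    by_cases hm : 1 ≤ m
    · have hmn : m = ((m.toNat : Nat) : Int) := by omega
      have hL : (PySem.List.pyRange 1 (m + 1) 1).foldl PySem.Int.bxor 0 =
          (if m.toNat % 4 = 0 then (m.toNat : Int)
           else if m.toNat % 4 = 1 then 1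
           else if m.toNat % 4 = 2 then (m.toNat : Int) + 1
           else 0) := by
        rw [hmn]; exact pv_xor_range m.toNat
      rw [hL, if_pos hm]
      simp only [PySem.Int.mod_eq_emod_of_pos (by omega : (0:Int) < 4)]
      split_ifs <;> omega
    · have hnil : PySem.List.pyRange 1 (m + 1) 1 = [] :=
        PySem.List.pyRange_one_eq_nil (by omega)
      rw [if_neg hm, hnil]
      rfl
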